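-- pv_equiv track=rewrite | github.com/Backbak100/extremly-specific-Quizlet-fixer | main.py | restring
-- ===== SOURCE A (Python) =====
-- def restring(string):
--     newstringeng = ""
--     newstringltn = ""
--     latin = False
--     for i in string:
--         if i == "\t":
--             latin = True
--             continue
--         if latin == False:
--             newstringeng += i
--         elif latin == True:
--             newstringltn += i
--
--     restrung = newstringltn + "\t" + newstringeng
--     return restrung
-- ===== SOURCE B (Python) =====
-- def restring(string):
--     before, _tab, after = string.partition("\t")
--     latin = "".join(c for c in after if c != "\t")
--     return latin + "\t" + before
-- ===== Notes on version B (the rewrite author's own statement) =====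
-- stated objective: simpler
-- what changed: Replaces the character-by-character loop with a boolean state flag by a split-point computation: partition at the first tab, filter remaining tabs out of the tail, and concatenate.
import Mathlib
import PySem

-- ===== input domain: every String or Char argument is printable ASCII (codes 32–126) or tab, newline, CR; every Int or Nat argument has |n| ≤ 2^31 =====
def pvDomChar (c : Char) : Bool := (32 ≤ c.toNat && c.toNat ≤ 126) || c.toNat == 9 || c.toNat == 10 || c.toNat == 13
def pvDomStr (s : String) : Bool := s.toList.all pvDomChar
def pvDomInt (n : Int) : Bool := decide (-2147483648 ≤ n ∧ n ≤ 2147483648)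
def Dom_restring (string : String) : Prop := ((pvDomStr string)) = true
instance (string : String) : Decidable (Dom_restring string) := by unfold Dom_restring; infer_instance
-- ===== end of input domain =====

-- B swaps the text around the first tab by computing the split point (partition) and
-- filtering the remaining tabs out of the tail, instead of A's char-by-char loop with a flag.

-- ===== PORT A =====
-- loop state: (newstringeng, newstringltn, latin), strings as List Char
def restring (string : String) : String :=
  let st := string.toList.foldl
    (fun (s : List Char × List Char × Bool) i =>
      if i = '\t' then (s.1, s.2.1, true)
      else if s.2.2 = false then (s.1 ++ [i], s.2.1, s.2.2)
      else (s.1, s.2.1 ++ [i], s.2.2))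
    ([], [], false)
  String.mk (st.2.1 ++ '\t' :: st.1)

-- ===== PORT B =====
-- string.partition("\t") ported by hand on the char list (exact for the single-char
-- separator: before = text before the first '\t', after = the rest, '' when no tab);
-- the join-of-generator is List.filter.
def restring_alt (string : String) : String :=
  let cs := string.toList
  let before := cs.takeWhile (· != '\t')
  let after := cs.drop (before.length + 1)
  let latin := after.filter (· != '\t')
  String.mk (latin ++ '\t' :: before)

-- ===== PRECONDITION & SPEC =====
def Spec_restring (string : String) (out : String) : Prop := out = restring_alt string
instance (string : String) (out : String) : Decidable (Spec_restring string out) := by unfold Spec_restring; infer_instance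

-- ===== CLAIM (what is proved, stated in full; the proofs are below) =====
def Claim_equal_restring : Prop := ∀ (string : String), Dom_restring string → Spec_restring string (restring string)

-- ===== LEMMAS AND PROOFS =====

def pvStepA (s : List Char × List Char × Bool) (i : Char) : List Char × List Char × Bool :=
  if i = '\t' then (s.1, s.2.1, true)
  else if s.2.2 = false then (s.1 ++ [i], s.2.1, s.2.2)
  else (s.1, s.2.1 ++ [i], s.2.2)

theorem pvFoldA_true (cs : List Char) (e l : List Char) :
    cs.foldl pvStepA (e, l, true) = (e, l ++ cs.filter (· != '\t'), true) := by
  induction cs generalizing l with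
  | nil => simp
  | cons c cs ih =>
    by_cases hc : c = '\t' <;>
      simp [pvStepA, hc, ih, List.filter_cons]

theorem pvFoldA_false (cs : List Char) (e l : List Char) :
    cs.foldl pvStepA (e, l, false) =
      (e ++ cs.takeWhile (· != '\t'),
       l ++ ((cs.dropWhile (· != '\t')).tail.filter (· != '\t')),
       !(cs.dropWhile (· != '\t')).isEmpty) := by
  induction cs generalizing e with
  | nil => simp
  | cons c cs ih =>
    by_cases hc : c = '\t'
    · simp [pvStepA, hc, pvFoldA_true, List.takeWhile_cons, List.dropWhile_cons]
    · simp [pvStepA, hc, ih, List.takeWhile_cons, List.dropWhile_cons]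

theorem pvDropSplit (cs : List Char) :
    cs.drop ((cs.takeWhile (· != '\t')).length + 1) = (cs.dropWhile (· != '\t')).tail := by
  have h : cs = cs.takeWhile (· != '\t') ++ cs.dropWhile (· != '\t') :=
    (List.takeWhile_append_dropWhile (p := (· != '\t')) (l := cs)).symm
  set t := cs.takeWhile (· != '\t') with ht
  set d := cs.dropWhile (· != '\t') with hd
  rw [h, List.drop_append]
  simp [List.drop_one]

-- ===== VERDICT (by name: the statement is the Claim_ definition above) =====
theorem restring_spec : Claim_equal_restring := by
  intro string _
  unfold Spec_restring restring restring_alt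
  have : (fun (s : List Char × List Char × Bool) i =>
      if i = '\t' then (s.1, s.2.1, true)
      else if s.2.2 = false then (s.1 ++ [i], s.2.1, s.2.2)
      else (s.1, s.2.1 ++ [i], s.2.2)) = pvStepA := by
    funext s i; simp [pvStepA]
  rw [this]
  simp only [pvFoldA_false, pvDropSplit]
  simp
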